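-- pv_equiv track=rewrite | github.com/balamogoulish/coding-test | 프로그래머스/2/42626. 더 맵게/더 맵게.py | solution
-- ===== SOURCE A (Python) =====
-- import heapq
--
-- def solution(scoville, K):
--     answer = 0
--     heapq.heapify(scoville)
--     while True:
--         h0 = heapq.heappop(scoville)
--         if h0 >= K:
--             break
--         if len(scoville)<1:
--             return -1
--         h1 = heapq.heappop(scoville)
--         heapq.heappush(scoville, h0+(h1*2))
--
--         answer+=1
--     return answer
-- ===== SOURCE B (Python) =====
-- def solution(scoville, K):
--     answer = 0
--     while True:
--         h0 = min(scoville)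
--         scoville.remove(h0)
--         if h0 >= K:
--             return answer
--         if len(scoville) < 1:
--             return -1
--         h1 = min(scoville)
--         scoville.remove(h1)
--         scoville.append(h0 + h1 * 2)
--         answer += 1
-- ===== Notes on version B (the rewrite author's own statement) =====
-- stated objective: alternative
-- what changed: Replaces the priority queue (heapify + sift-based pops/pushes) by repeated linear selection: each round scans the plain list with min(), removes the two minima and appends the mixed value, maintaining no ordered structure at all.
import Mathlib
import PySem

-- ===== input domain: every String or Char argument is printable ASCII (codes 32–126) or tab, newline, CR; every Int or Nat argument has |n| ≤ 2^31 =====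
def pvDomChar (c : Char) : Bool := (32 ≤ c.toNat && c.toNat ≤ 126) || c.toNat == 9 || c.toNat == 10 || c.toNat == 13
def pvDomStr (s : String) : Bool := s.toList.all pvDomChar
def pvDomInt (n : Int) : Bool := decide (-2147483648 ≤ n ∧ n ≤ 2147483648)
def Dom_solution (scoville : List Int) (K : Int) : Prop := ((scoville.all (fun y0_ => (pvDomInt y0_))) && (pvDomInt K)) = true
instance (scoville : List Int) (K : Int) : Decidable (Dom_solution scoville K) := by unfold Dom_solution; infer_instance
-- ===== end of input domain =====

-- B drops the priority queue entirely: each round it selects the two minima of the plain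
-- list by linear scans (min + remove) and appends the mixed value; no ordered structure is
-- maintained. Both A and B reorder/mutate the caller's list in place (heapify vs remove/append);
-- the equivalence proved here is about the return value only.

-- ===== PORT A =====
-- hand port of heapq (CPython _siftdown/_siftup/heapify/heappush/heappop), exact step for step;
-- list indexing uses getD: every access is in range on the runs admitted by Pre_solution.

def hGet (l : List Int) (i : Nat) : Int := l.getD i 0

-- heapq._siftdown's while loop; newitem = heap[pos] is read once by the caller.
-- The first argument is fuel making the recursion structural: pos strictly decreases
-- each iteration, so fuel = the initial pos always suffices and the fuel case is never
-- the one that stops the loop.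
def siftdownLoop : Nat → List Int → Nat → Nat → Int → List Int × Nat
  | 0, heap, _, pos, _ => (heap, pos)
  | fuel + 1, heap, startpos, pos, newitem =>
    if startpos < pos then
      let parentpos := (pos - 1) / 2
      let parent := hGet heap parentpos
      if newitem < parent then
        siftdownLoop fuel (heap.set pos parent) startpos parentpos newitem
      else (heap, pos)
    else (heap, pos)

-- heapq._siftdown: bubble heap[pos] up towards startpos
def siftdown (heap : List Int) (startpos pos : Nat) : List Int :=
  let newitem := hGet heap pos
  let r := siftdownLoop pos heap startpos pos newitem
  r.1.set r.2 newitem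

-- heapq._siftup's while loop: move the smaller child up until reaching a leaf.
-- The first argument is fuel making the recursion structural: pos strictly increases while
-- the loop runs only as long as 2*pos+1 < len, so fuel = heap.length always suffices.
def siftupLoop : Nat → List Int → Nat → List Int × Nat
  | 0, heap, pos => (heap, pos)
  | fuel + 1, heap, pos =>
    if 2 * pos + 1 < heap.length then
      let childpos :=
        if 2 * pos + 2 < heap.length ∧ ¬ hGet heap (2 * pos + 1) < hGet heap (2 * pos + 2) then
          2 * pos + 2
        else 2 * pos + 1
      siftupLoop fuel (heap.set pos (hGet heap childpos)) childpos
    else (heap, pos)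

-- heapq._siftup: slide the hole to a leaf, plant newitem there, then _siftdown back up
def siftup (heap : List Int) (pos : Nat) : List Int :=
  let newitem := hGet heap pos
  let r := siftupLoop heap.length heap pos
  siftdown (r.1.set r.2 newitem) pos r.2

-- heapq.heapify: for i in reversed(range(n//2)): _siftup(x, i)
def heapifyAux : List Int → Nat → List Int
  | heap, 0 => heap
  | heap, i + 1 => heapifyAux (siftup heap i) i

def heapify (x : List Int) : List Int := heapifyAux x (x.length / 2)

-- heapq.heappush
def heappush (heap : List Int) (item : Int) : List Int :=
  let heap' := heap ++ [item]
  siftdown heap' 0 (heap'.length - 1)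

-- heapq.heappop; heap.pop() on [] raises IndexError — excluded by Pre_solution
def heappop (heap : List Int) : Int × List Int :=
  let lastelt := heap.getLast?.getD 0
  let rest := heap.dropLast
  if rest.isEmpty then (lastelt, rest)
  else (hGet rest 0, siftup (rest.set 0 lastelt) 0)

-- the while True loop of A's solution; fuel = the heap's length makes the recursion
-- structural (each round removes one element net), and fuel 0 means the heap is empty,
-- where Python's heappop would raise IndexError — excluded by Pre_solution.
def loopA (K : Int) : Nat → List Int → Int → Int
  | 0, _, _ => 0   -- dead branch: heappop on the empty heap raises IndexError
  | fuel + 1, heap, answer =>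
    let p := heappop heap
    if K ≤ p.1 then answer
    else if p.2.length < 1 then -1
    else
      let q := heappop p.2
      loopA K fuel (heappush q.2 (p.1 + q.1 * 2)) (answer + 1)

def solution (scoville : List Int) (K : Int) : Int :=
  loopA K (heapify scoville).length (heapify scoville) 0

-- ===== PORT B =====
-- the while True loop of B's solution: min() scan, remove first occurrence, append the mix.
-- fuel = the pool's length makes the recursion structural (each round removes one element
-- net); fuel 0 means the pool is empty, where Python's min([]) raises ValueError —
-- excluded by Pre_solution.
def loopB (K : Int) : Nat → List Int → Int → Int
  | 0, _, _ => 0   -- dead branch: min([]) raises ValueError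
  | fuel + 1, pool, answer =>
    let h0 := (PySem.List.min? pool (fun y => y)).getD 0
    let rest := (PySem.List.remove? pool h0).getD []
    if K ≤ h0 then answer
    else if rest.length < 1 then -1
    else
      let h1 := (PySem.List.min? rest (fun y => y)).getD 0
      let rest2 := (PySem.List.remove? rest h1).getD []
      loopB K fuel (rest2 ++ [h0 + h1 * 2]) (answer + 1)

def solution_alt (scoville : List Int) (K : Int) : Int := loopB K scoville.length scoville 0

-- ===== PRECONDITION & SPEC =====
-- Pre_ excludes only the empty list, on which both A (heappop, IndexError) and B (min, ValueError) raise.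
def Pre_solution (scoville : List Int) (K : Int) : Prop := scoville ≠ []
instance (scoville : List Int) (K : Int) : Decidable (Pre_solution scoville K) := by
  unfold Pre_solution; infer_instance

def pvWitness_solution : List Int × Int := ([1, 2, 3, 9, 10, 12], 7)

def Spec_solution (scoville : List Int) (K : Int) (out : Int) : Prop := out = solution_alt scoville K
instance (scoville : List Int) (K : Int) (out : Int) : Decidable (Spec_solution scoville K out) := by
  unfold Spec_solution; infer_instance

-- ===== CLAIM (what is proved, stated in full; the proofs are below) =====
def Claim_equal_solution : Prop := ∀ (scoville : List Int) (K : Int), Dom_solution scoville K → Pre_solution scoville K → Spec_solution scoville K (solution scoville K)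

-- ===== LEMMAS AND PROOFS =====

-- length preservation of the heap primitives
theorem len_siftdownLoop (fuel : Nat) (heap : List Int) (s p : Nat) (x : Int) :
    (siftdownLoop fuel heap s p x).1.length = heap.length := by
  fun_induction siftdownLoop fuel heap s p x <;> simp_all [List.length_set]

theorem len_siftdown (heap : List Int) (s p : Nat) :
    (siftdown heap s p).length = heap.length := by
  simp [siftdown, List.length_set, len_siftdownLoop]

theorem len_siftupLoop (fuel : Nat) (heap : List Int) (p : Nat) :
    (siftupLoop fuel heap p).1.length = heap.length := by
  fun_induction siftupLoop fuel heap p <;> simp_all [List.length_set]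

theorem len_siftup (heap : List Int) (p : Nat) :
    (siftup heap p).length = heap.length := by
  simp [siftup, len_siftdown, List.length_set, len_siftupLoop]

theorem len_heappop (heap : List Int) (h : heap ≠ []) :
    (heappop heap).2.length + 1 = heap.length := by
  have := List.length_pos_of_ne_nil h
  simp only [heappop]
  split
  · simp [List.length_dropLast]; omega
  · simp [len_siftup, List.length_set, List.length_dropLast]; omega

theorem len_heappush (heap : List Int) (x : Int) :
    (heappush heap x).length = heap.length + 1 := by
  simp [heappush, len_siftdown]


-- hGet on literals / set
theorem hGet_eq (l : List Int) (j : Nat) (h : j < l.length) : hGet l j = l[j] := by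
  simp [hGet, List.getD_eq_getElem?_getD, List.getElem?_eq_getElem h]

theorem hGet_set_self (l : List Int) (i : Nat) (hi : i < l.length) (a : Int) :
    hGet (l.set i a) i = a := by
  rw [hGet_eq _ _ (by simpa using hi)]; simp

theorem hGet_set_ne (l : List Int) (i j : Nat) (hij : i ≠ j) (a : Int) :
    hGet (l.set i a) j = hGet l j := by
  simp [hGet, List.getD_eq_getElem?_getD, List.getElem?_set_ne hij]

-- multiset fact used for both sift loops: overwrite i with the value at j, then j is free
theorem set_set_perm :
    ∀ (l : List Int) (i j : Nat), i ≠ j → i < l.length → j < l.length → ∀ y : Int,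
      ((l.set i (hGet l j)).set j y).Perm (l.set i y) := by
  intro l i j
  induction l generalizing i j with
  | nil => simp
  | cons a t ih =>
    intro hij hi hj y
    match i, j with
    | 0, 0 => omega
    | 0, (k+1) =>
      have hk : k < t.length := by simpa using hj
      simp only [List.set_cons_zero, List.set_cons_succ]
      rw [hGet_eq _ _ hj]
      simp only [List.getElem_cons_succ]
      have h1 : (t.set k y).Perm (y :: t.eraseIdx k) := List.set_perm_cons_eraseIdx hk y
      have h2 : t.Perm (t[k] :: t.eraseIdx k) := (List.getElem_cons_eraseIdx_perm hk).symm
      exact ((h1.cons _).trans (List.Perm.swap _ _ _)).trans (h2.cons _).symm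
    | (k+1), 0 =>
      have hk : k < t.length := by simpa using hi
      simp only [List.set_cons_zero, List.set_cons_succ]
      rw [hGet_eq _ _ hj]
      simp only [List.getElem_cons_zero]
      have h1 : (t.set k a).Perm (a :: t.eraseIdx k) := List.set_perm_cons_eraseIdx hk a
      have h2 : (t.set k y).Perm (y :: t.eraseIdx k) := List.set_perm_cons_eraseIdx hk y
      exact ((h1.cons _).trans (List.Perm.swap _ _ _)).trans (h2.cons _).symm
    | (k+1), (m+1) =>
      have hm : m < t.length := by simpa using hj
      simp only [List.set_cons_succ]
      rw [hGet_eq _ _ hj]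
      simp only [List.getElem_cons_succ]
      have := ih k m (by omega) (by simpa using hi) hm y
      rw [hGet_eq _ _ hm] at this
      exact this.cons a

-- ancestor relation in the implicit binary tree: j lies in the subtree rooted at s
def Desc (s : Nat) (j : Nat) : Prop :=
  if j ≤ s then j = s else Desc s ((j - 1) / 2)
  termination_by j
  decreasing_by have := Nat.div_le_self (j - 1) 2; omega

theorem desc_self (s : Nat) : Desc s s := by rw [Desc]; simp

theorem desc_le {s j : Nat} (h : Desc s j) : s ≤ j := by
  rw [Desc] at h; split at h <;> omega


theorem desc_parent {s j : Nat} (h : Desc s j) (hne : j ≠ s) : Desc s ((j - 1) / 2) := by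
  rw [Desc] at h; have := desc_le (s := s) (j := j); split at h
  · omega
  · exact h

theorem desc_parent_le {s j : Nat} (h : Desc s j) (hne : j ≠ s) : s ≤ (j - 1) / 2 :=
  desc_le (desc_parent h hne)

theorem desc_child {s j c : Nat} (h : Desc s j) (hc : j < c) (hc2 : (c - 1) / 2 = j) :
    Desc s c := by
  have := desc_le h; rw [Desc]; split
  · omega
  · rw [hc2]; exact h

theorem desc_zero (j : Nat) : Desc 0 j := by
  induction j using Nat.strong_induction_on with
  | _ j ih =>
    rw [Desc]; split
    · omega
    · exact ih _ (by have := Nat.div_le_self (j - 1) 2; omega)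

-- "every parent edge at index ≥ s holds": HAbove 0 is the heap invariant
def HAbove (s : Nat) (l : List Int) : Prop :=
  ∀ j, 0 < j → j < l.length → s ≤ (j - 1) / 2 → hGet l ((j - 1) / 2) ≤ hGet l j

-- the root of a heap is a minimum
theorem root_le (l : List Int) (hh : HAbove 0 l) : ∀ j, j < l.length → hGet l 0 ≤ hGet l j := by
  intro j
  induction j using Nat.strong_induction_on with
  | _ j ih =>
    intro hj
    rcases Nat.eq_zero_or_pos j with rfl | hpos
    · exact le_refl _
    · exact le_trans (ih ((j - 1) / 2) (by omega) (by omega)) (hh j hpos hj (Nat.zero_le _))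

theorem root_le_mem (l : List Int) (hh : HAbove 0 l) {x : Int} (hx : x ∈ l) : hGet l 0 ≤ x := by
  obtain ⟨j, hj, rfl⟩ := List.mem_iff_getElem.1 hx
  rw [← hGet_eq l j hj]; exact root_le l hh j hj

-- fuel irrelevance for _siftdown's loop: any fuel ≥ pos computes the same result
theorem sdl_fuel : ∀ (f1 f2 : Nat) (l : List Int) (s p : Nat) (x : Int), p ≤ f1 → p ≤ f2 →
    siftdownLoop f1 l s p x = siftdownLoop f2 l s p x := by
  intro f1
  induction f1 with
  | zero =>
    intro f2 l s p x h1 h2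
    have hp : p = 0 := by omega
    subst hp
    cases f2 <;> simp [siftdownLoop]
  | succ k ih =>
    intro f2 l s p x h1 h2
    cases f2 with
    | zero =>
      have hp : p = 0 := by omega
      subst hp
      simp [siftdownLoop]
    | succ j =>
      simp only [siftdownLoop]
      by_cases hs : s < p
      · simp only [if_pos hs]
        by_cases hx : x < hGet l ((p - 1) / 2)
        · simp only [if_pos hx]
          exact ih j _ s _ x (by omega) (by omega)
        · simp only [if_neg hx]
      · simp only [if_neg hs]

-- one unfolding step of _siftdown's loop at the canonical fuel (= pos)
theorem sdl_unfold (l : List Int) (s p : Nat) (x : Int) :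
    siftdownLoop p l s p x =
      if s < p then
        if x < hGet l ((p - 1) / 2) then
          siftdownLoop ((p - 1) / 2) (l.set p (hGet l ((p - 1) / 2))) s ((p - 1) / 2) x
        else (l, p)
      else (l, p) := by
  cases p with
  | zero => simp [siftdownLoop]
  | succ m =>
    simp only [siftdownLoop]
    by_cases hs : s < m + 1
    · simp only [if_pos hs]
      by_cases hx : x < hGet l ((m + 1 - 1) / 2)
      · simp only [if_pos hx]
        exact sdl_fuel m ((m + 1 - 1) / 2) _ s _ x (by omega) (by omega)
      · simp only [if_neg hx]
    · simp only [if_neg hs]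

-- ===== correctness of _siftdown (phase 2: bubble newitem up) =====
theorem sdl_spec (s : Nat) (x : Int) :
    ∀ (p : Nat) (l : List Int), Desc s p → p < l.length →
    (∀ j, 0 < j → j < l.length → s ≤ (j - 1) / 2 → j ≠ p → hGet l ((j - 1) / 2) ≤ hGet l j) →
    (∀ j, j < l.length → (j - 1) / 2 = p → 0 < j → x ≤ hGet l j) →
    (∀ j, j < l.length → (j - 1) / 2 = p → 0 < j → s < p → hGet l ((p - 1) / 2) ≤ hGet l j) →
    (siftdownLoop p l s p x).2 < l.length ∧
    (siftdownLoop p l s p x).1.length = l.length ∧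
    (∀ y : Int, ((siftdownLoop p l s p x).1.set (siftdownLoop p l s p x).2 y).Perm (l.set p y)) ∧
    HAbove s ((siftdownLoop p l s p x).1.set (siftdownLoop p l s p x).2 x) := by
  intro p
  induction p using Nat.strong_induction_on with
  | _ p ih =>
    intro l hd hp H G1 G2
    rw [sdl_unfold]
    split
    · rename_i hs
      have hpp : (p - 1) / 2 < p := by have := Nat.div_le_self (p - 1) 2; omega
      set pp := (p - 1) / 2 with hppdef
      set π := hGet l pp with hπdef
      split
      · -- x < π : recurse at pp on l' = l.set p π
        rename_i hx
        have hne : pp ≠ p := by omega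
        have hd' : Desc s pp := desc_parent hd (by omega)
        have hsle : s ≤ pp := desc_le hd'
        obtain ⟨c1, c2, c3, c4⟩ :=
          ih pp hpp (l.set p π) hd' (by simp; omega)
            (by -- H'
              intro j hj0 hjlen hjs hjne
              simp only [List.length_set] at hjlen
              by_cases hjp : j = p
              · subst hjp
                rw [hGet_set_ne _ _ _ (by omega), hGet_set_self _ _ hp]
              · by_cases hparp : (j - 1) / 2 = p
                · rw [hparp, hGet_set_self _ _ hp, hGet_set_ne _ _ _ (by omega)]
                  exact G2 j hjlen hparp hj0 (by omega)
                · rw [hGet_set_ne _ _ _ (by omega), hGet_set_ne _ _ _ (by omega)]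
                  exact H j hj0 hjlen hjs hjp)
            (by -- G1'
              intro j hjlen hjpar hj0
              simp only [List.length_set] at hjlen
              by_cases hjp : j = p
              · subst hjp; rw [hGet_set_self _ _ hp]; exact le_of_lt hx
              · rw [hGet_set_ne _ _ _ (by omega)]
                have hh := H j hj0 hjlen (by rw [hjpar]; exact hsle) hjp
                rw [hjpar] at hh
                exact le_trans (le_of_lt hx) hh)
            (by -- G2'
              intro j hjlen hjpar hj0 hspp
              simp only [List.length_set] at hjlen
              have hppp : (pp - 1) / 2 < pp := by have := Nat.div_le_self (pp - 1) 2; omega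
              have h1 : hGet l ((pp - 1) / 2) ≤ π :=
                H pp (by omega) (by omega) (desc_parent_le hd' (by omega)) (by omega)
              rw [hGet_set_ne _ _ _ (by omega)]
              by_cases hjp : j = p
              · subst hjp; rw [hGet_set_self _ _ hp]; exact h1
              · rw [hGet_set_ne _ _ _ (by omega)]
                have hh := H j hj0 hjlen (by rw [hjpar]; exact hsle) hjp
                rw [hjpar] at hh
                exact le_trans h1 hh)
        refine ⟨by simpa using c1, by simpa using c2, ?_, c4⟩
        intro y
        exact (c3 y).trans (set_set_perm l p pp (by omega) hp (by omega) y)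
      · -- π ≤ x : stop here, plant x at p
        rename_i hx
        refine ⟨hp, rfl, fun y => List.Perm.refl _, ?_⟩
        intro j hj0 hjlen hjs
        simp only [List.length_set] at hjlen
        by_cases hjp : j = p
        · subst hjp
          rw [hGet_set_ne _ _ _ (by omega), hGet_set_self _ _ hp, ← hppdef]
          show π ≤ x
          omega
        · by_cases hparp : (j - 1) / 2 = p
          · rw [hparp, hGet_set_self _ _ hp, hGet_set_ne _ _ _ (by omega)]
            exact G1 j hjlen hparp hj0
          · rw [hGet_set_ne _ _ _ (by omega), hGet_set_ne _ _ _ (by omega)]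
            exact H j hj0 hjlen hjs hjp
    · -- p ≤ s : p = s, stop
      rename_i hs
      have hps : p = s := by have := desc_le hd; omega
      refine ⟨hp, rfl, fun y => List.Perm.refl _, ?_⟩
      intro j hj0 hjlen hjs
      simp only [List.length_set] at hjlen
      by_cases hjp : j = p
      · subst hjp; omega
      · by_cases hparp : (j - 1) / 2 = p
        · rw [hparp, hGet_set_self _ _ hp, hGet_set_ne _ _ _ (by omega)]
          exact G1 j hjlen hparp hj0
        · rw [hGet_set_ne _ _ _ (by omega), hGet_set_ne _ _ _ (by omega)]
          exact H j hj0 hjlen hjs hjp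

-- ===== correctness of _siftup's descent (phase 1: slide the hole to a leaf) =====
theorem sul_specN (s : Nat) :
    ∀ (N : Nat) (l : List Int) (p : Nat), l.length ≤ p + N → Desc s p → p < l.length →
    (∀ j, 0 < j → j < l.length → s ≤ (j - 1) / 2 → j ≠ p → (j - 1) / 2 ≠ p →
        hGet l ((j - 1) / 2) ≤ hGet l j) →
    (p ≠ s → ∀ j, j < l.length → (j - 1) / 2 = p → 0 < j → hGet l ((p - 1) / 2) ≤ hGet l j) →
    (siftupLoop N l p).2 < l.length ∧
    (siftupLoop N l p).1.length = l.length ∧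
    Desc s (siftupLoop N l p).2 ∧
    l.length ≤ 2 * (siftupLoop N l p).2 + 1 ∧
    (∀ y : Int, ((siftupLoop N l p).1.set (siftupLoop N l p).2 y).Perm (l.set p y)) ∧
    (∀ j, 0 < j → j < l.length → s ≤ (j - 1) / 2 → j ≠ (siftupLoop N l p).2 →
        hGet (siftupLoop N l p).1 ((j - 1) / 2) ≤ hGet (siftupLoop N l p).1 j) := by
  intro N
  induction N with
  | zero => intro l p hN _ hp _ _; omega
  | succ N ih =>
    intro l p hN hd hp H G2
    simp only [siftupLoop]
    split
    · rename_i hch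
      have step : ∀ c, 0 < c → c < l.length → (c - 1) / 2 = p →
          (∀ o, o < l.length → (o - 1) / 2 = p → 0 < o → hGet l c ≤ hGet l o) →
          (siftupLoop N (l.set p (hGet l c)) c).2 < l.length ∧
          (siftupLoop N (l.set p (hGet l c)) c).1.length = l.length ∧
          Desc s (siftupLoop N (l.set p (hGet l c)) c).2 ∧
          l.length ≤ 2 * (siftupLoop N (l.set p (hGet l c)) c).2 + 1 ∧
          (∀ y : Int,
            ((siftupLoop N (l.set p (hGet l c)) c).1.set (siftupLoop N (l.set p (hGet l c)) c).2 y).Perm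
              (l.set p y)) ∧
          (∀ j, 0 < j → j < l.length → s ≤ (j - 1) / 2 → j ≠ (siftupLoop N (l.set p (hGet l c)) c).2 →
              hGet (siftupLoop N (l.set p (hGet l c)) c).1 ((j - 1) / 2) ≤
                hGet (siftupLoop N (l.set p (hGet l c)) c).1 j) := by
        intro c hc0 hc1 hc2 hcmin
        have hcp : p < c := by omega
        have hdc : Desc s c := desc_child hd hcp hc2
        have hsc : s ≤ c := desc_le hdc
        obtain ⟨c1, c2, c3, c4, c5, c6⟩ :=
          ih (l.set p (hGet l c)) c (by simp only [List.length_set]; omega) hdc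
            (by simp only [List.length_set]; omega)
            (by -- H'
              intro j hj0 hjlen hjs hjnec hjparc
              simp only [List.length_set] at hjlen
              by_cases hjp : j = p
              · have hps : p ≠ s := by intro h2; omega
                rw [hjp, hGet_set_ne _ _ _ (by omega), hGet_set_self _ _ hp]
                exact G2 hps c hc1 hc2 (by omega)
              · by_cases hparp : (j - 1) / 2 = p
                · rw [hparp, hGet_set_self _ _ hp, hGet_set_ne _ _ _ (by omega)]
                  exact hcmin j hjlen hparp hj0
                · rw [hGet_set_ne _ _ _ (by omega), hGet_set_ne _ _ _ (by omega)]
                  exact H j hj0 hjlen hjs hjp hparp)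
            (by -- G2'
              intro _ j hjlen hjparc hj0
              simp only [List.length_set] at hjlen
              rw [hc2, hGet_set_self _ _ hp, hGet_set_ne _ _ _ (by omega)]
              have hh := H j hj0 hjlen (by rw [hjparc]; exact hsc) (by omega) (by omega)
              rw [hjparc] at hh
              exact hh)
        refine ⟨by simpa using c1, by simpa using c2, c3, by simpa using c4, ?_,
          fun j hj0 hjlen hjs hjne => c6 j hj0 (by simpa using hjlen) hjs hjne⟩
        intro y
        exact (c5 y).trans (set_set_perm l p c (by omega) hp hc1 y)
      split
      · rename_i hcond
        exact step (2 * p + 2) (by omega) (by omega) (by omega)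
          (by
            intro o holen hopar ho0
            have : o = 2 * p + 1 ∨ o = 2 * p + 2 := by omega
            rcases this with rfl | rfl
            · omega
            · exact le_refl _)
      · rename_i hcond
        push Not at hcond
        exact step (2 * p + 1) (by omega) (by omega) (by omega)
          (by
            intro o holen hopar ho0
            have : o = 2 * p + 1 ∨ o = 2 * p + 2 := by omega
            rcases this with rfl | rfl
            · exact le_refl _
            · exact le_of_lt (hcond (by omega)))
    · rename_i hch
      refine ⟨hp, rfl, hd, by omega, fun y => List.Perm.refl _, ?_⟩
      intro j hj0 hjlen hjs hjne
      exact H j hj0 hjlen hjs hjne (by omega)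

theorem sul_spec (s : Nat) (l : List Int) (p : Nat) (hd : Desc s p) (hp : p < l.length)
    (H : ∀ j, 0 < j → j < l.length → s ≤ (j - 1) / 2 → j ≠ p → (j - 1) / 2 ≠ p →
        hGet l ((j - 1) / 2) ≤ hGet l j)
    (G2 : p ≠ s → ∀ j, j < l.length → (j - 1) / 2 = p → 0 < j →
        hGet l ((p - 1) / 2) ≤ hGet l j) :
    (siftupLoop l.length l p).2 < l.length ∧
    (siftupLoop l.length l p).1.length = l.length ∧
    Desc s (siftupLoop l.length l p).2 ∧
    l.length ≤ 2 * (siftupLoop l.length l p).2 + 1 ∧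
    (∀ y : Int, ((siftupLoop l.length l p).1.set (siftupLoop l.length l p).2 y).Perm (l.set p y)) ∧
    (∀ j, 0 < j → j < l.length → s ≤ (j - 1) / 2 → j ≠ (siftupLoop l.length l p).2 →
        hGet (siftupLoop l.length l p).1 ((j - 1) / 2) ≤ hGet (siftupLoop l.length l p).1 j) :=
  sul_specN s l.length l p (by omega) hd hp H G2

theorem hGet_append (h : List Int) (x : Int) (k : Nat) (hk : k < h.length) :
    hGet (h ++ [x]) k = hGet h k := by
  rw [hGet_eq _ _ (by simp; omega), hGet_eq _ _ hk]
  exact List.getElem_append_left (by omega)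

theorem hGet_dropLast (h : List Int) (k : Nat) (hk : k < h.dropLast.length) :
    hGet h.dropLast k = hGet h k := by
  rw [hGet_eq _ _ hk, hGet_eq _ _ (by simp at hk ⊢; omega)]
  exact List.getElem_dropLast _

theorem siftup_spec (l : List Int) (p : Nat) (hp : p < l.length)
    (H : ∀ j, 0 < j → j < l.length → p ≤ (j - 1) / 2 → (j - 1) / 2 ≠ p →
        hGet l ((j - 1) / 2) ≤ hGet l j) :
    (siftup l p).length = l.length ∧ (siftup l p).Perm l ∧ HAbove p (siftup l p) := by
  obtain ⟨c1, c2, c3, c4, c5, c6⟩ :=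
    sul_spec p l p (desc_self p) hp
      (fun j hj0 hjl hjs hjne hpne => H j hj0 hjl hjs hpne)
      (fun hne => absurd rfl hne)
  simp only [siftup, siftdown]
  have hr2 : (siftupLoop l.length l p).2 < ((siftupLoop l.length l p).1.set (siftupLoop l.length l p).2 (hGet l p)).length := by
    simp only [List.length_set]; omega
  have hx : hGet ((siftupLoop l.length l p).1.set (siftupLoop l.length l p).2 (hGet l p)) (siftupLoop l.length l p).2
      = hGet l p := hGet_set_self _ _ (by omega) _
  rw [hx]
  obtain ⟨d1, d2, d3, d4⟩ :=
    sdl_spec p (hGet l p) (siftupLoop l.length l p).2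
      ((siftupLoop l.length l p).1.set (siftupLoop l.length l p).2 (hGet l p)) c3 hr2
      (by -- H for phase 2
        intro j hj0 hjl hjs hjne
        simp only [List.length_set] at hjl
        have hparne : (j - 1) / 2 ≠ (siftupLoop l.length l p).2 := by omega
        rw [hGet_set_ne _ _ _ (Ne.symm hparne), hGet_set_ne _ _ _ (Ne.symm hjne)]
        exact c6 j hj0 (by omega) hjs hjne)
      (by intro j hjl hjpar hj0; simp only [List.length_set] at hjl; omega)
      (by intro j hjl hjpar hj0 _; simp only [List.length_set] at hjl; omega)
  refine ⟨?_, ?_, ?_⟩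
  · simp only [List.length_set] at d2 ⊢; omega
  · have e1 := d3 (hGet l p)
    rw [List.set_set] at e1
    have e2 := c5 (hGet l p)
    have h3 : l.set p (hGet l p) = l := by
      rw [hGet_eq _ _ hp]; exact List.set_getElem_self hp
    rw [h3] at e2
    exact e1.trans e2
  · exact d4

theorem heapifyAux_spec :
    ∀ (i : Nat) (l : List Int), 2 * i ≤ l.length → HAbove i l →
      (heapifyAux l i).length = l.length ∧ (heapifyAux l i).Perm l ∧ HAbove 0 (heapifyAux l i) := by
  intro i
  induction i with
  | zero => intro l _ h; exact ⟨rfl, List.Perm.refl _, h⟩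
  | succ i ih =>
    intro l hlen hH
    have hp : i < l.length := by omega
    obtain ⟨e1, e2, e3⟩ := siftup_spec l i hp
      (fun j hj0 hjl hjs hne => hH j hj0 hjl (by omega))
    obtain ⟨f1, f2, f3⟩ := ih (siftup l i) (by rw [e1]; omega) e3
    exact ⟨f1.trans e1, f2.trans e2, f3⟩

theorem heapify_spec (l : List Int) :
    (heapify l).length = l.length ∧ (heapify l).Perm l ∧ HAbove 0 (heapify l) := by
  have h0 : HAbove (l.length / 2) l := by
    intro j hj0 hjl hjs; omega
  exact heapifyAux_spec (l.length / 2) l (by omega) h0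

theorem heappush_spec (h : List Int) (hh : HAbove 0 h) (x : Int) :
    (heappush h x).Perm (x :: h) ∧ HAbove 0 (heappush h x) := by
  simp only [heappush, siftdown, List.length_append, List.length_cons, List.length_nil,
    Nat.add_sub_cancel]
  have hn : hGet (h ++ [x]) h.length = x := by
    rw [hGet_eq _ _ (by simp)]
    exact List.getElem_concat_length rfl (by simp)
  rw [hn]
  obtain ⟨d1, d2, d3, d4⟩ := sdl_spec 0 x h.length (h ++ [x]) (desc_zero _) (by simp)
    (by
      intro j hj0 hjl hjs hjne
      simp only [List.length_append, List.length_cons, List.length_nil] at hjl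
      have hj : j < h.length := by omega
      rw [hGet_append _ _ _ (by omega), hGet_append _ _ _ hj]
      exact hh j hj0 hj (by omega))
    (by
      intro j hjl hjpar hj0
      simp only [List.length_append, List.length_cons, List.length_nil] at hjl; omega)
    (by
      intro j hjl hjpar hj0 _
      simp only [List.length_append, List.length_cons, List.length_nil] at hjl; omega)
  constructor
  · have e1 := d3 x
    have h3 : (h ++ [x]).set h.length x = h ++ [x] := by simp
    rw [h3] at e1
    exact e1.trans (List.perm_append_singleton x h)
  · exact d4

theorem heappop_spec (h : List Int) (hh : HAbove 0 h) (hne : h ≠ []) :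
    (heappop h).1 = hGet h 0 ∧ ((heappop h).1 :: (heappop h).2).Perm h ∧
    HAbove 0 (heappop h).2 := by
  have hlen : 0 < h.length := List.length_pos_of_ne_nil hne
  simp only [heappop]
  split
  · -- dropLast = []: h is a singleton
    rename_i hemp
    rw [List.isEmpty_iff] at hemp
    have h1 : h.length = 1 := by
      have := List.length_dropLast (xs := h)
      rw [hemp] at this; simp at this; omega
    obtain ⟨a, rfl⟩ := List.length_eq_one_iff.mp h1
    refine ⟨by simp [hGet], by simp, ?_⟩
    intro j hj0 hjl hjs; simp at hjl
  · rename_i hemp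
    rw [List.isEmpty_iff] at hemp
    have hrlen : 0 < h.dropLast.length := List.length_pos_of_ne_nil hemp
    have hrlen' : h.dropLast.length = h.length - 1 := List.length_dropLast (xs := h)
    have hlast : h.getLast?.getD 0 = h.getLast hne := by
      rw [List.getLast?_eq_some_getLast hne]; rfl
    have hv : hGet h.dropLast 0 = hGet h 0 := hGet_dropLast h 0 hrlen
    set l0 := h.dropLast.set 0 (h.getLast?.getD 0) with hl0
    have hl0len : l0.length = h.dropLast.length := by rw [hl0]; simp
    obtain ⟨e1, e2, e3⟩ := siftup_spec l0 0 (by omega)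
      (by
        intro j hj0 hjl hjs hpne
        rw [hl0len] at hjl
        have hj1 : (j - 1) / 2 ≠ 0 := hpne
        rw [hl0, hGet_set_ne _ _ _ (by omega), hGet_set_ne _ _ _ (by omega),
          hGet_dropLast _ _ (by omega), hGet_dropLast _ _ (by omega)]
        exact hh j hj0 (by omega) (by omega))
    refine ⟨hv, ?_, ?_⟩
    · -- (hGet h 0 :: siftup l0 0) ~ h
      have s2 : l0.Perm ((h.getLast?.getD 0) :: h.dropLast.eraseIdx 0) :=
        List.set_perm_cons_eraseIdx hrlen _
      have s3 : h.dropLast.Perm (h.dropLast[0] :: h.dropLast.eraseIdx 0) :=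
        (List.getElem_cons_eraseIdx_perm hrlen).symm
      have s4 : (h.dropLast ++ [h.getLast hne]) = h := List.dropLast_append_getLast hne
      have s5 : h.Perm ((h.getLast?.getD 0) :: h.dropLast) := by
        have s5a := List.perm_append_singleton (h.getLast hne) h.dropLast
        rw [s4] at s5a
        rw [hlast]
        exact s5a
      have s6 : h.Perm ((h.getLast?.getD 0) :: h.dropLast[0] :: h.dropLast.eraseIdx 0) :=
        s5.trans (s3.cons _)
      have s7 : hGet h 0 = h.dropLast[0] := by
        rw [← hv, hGet_eq _ _ hrlen]
      show (hGet h.dropLast 0 :: siftup l0 0).Perm h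
      rw [hv, s7]
      exact ((e2.trans s2).cons _).trans ((List.Perm.swap _ _ _).trans s6.symm)
    · exact e3

-- min() + remove() on a nonempty list: the selected value is the minimum and what is
-- left is a permutation complement
theorem minRemove_spec (l : List Int) (h : l ≠ []) :
    ((PySem.List.min? l (fun y => y)).getD 0) ∈ l ∧
    (∀ y ∈ l, ((PySem.List.min? l (fun y => y)).getD 0) ≤ y) ∧
    (((PySem.List.min? l (fun y => y)).getD 0)
        :: ((PySem.List.remove? l ((PySem.List.min? l (fun y => y)).getD 0)).getD [])).Perm l := by
  obtain ⟨m, hm⟩ := Option.ne_none_iff_exists'.mp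
    (fun hn => h ((PySem.List.min?_eq_none_iff l (fun y => y)).mp hn))
  have hmem : m ∈ l := PySem.List.min?_mem hm
  rw [hm, Option.getD_some, PySem.List.remove?_eq_some_erase l m hmem, Option.getD_some]
  exact ⟨hmem, fun y hy => PySem.List.min?_isMin hm y hy, (List.perm_cons_erase hmem).symm⟩

-- the bridging invariant: the heap and B's plain pool hold the same multiset
theorem loop_eq (K : Int) :
    ∀ n (h s : List Int) (ans : Int), h.length = n → h ≠ [] →
      HAbove 0 h → h.Perm s → loopA K n h ans = loopB K n s ans := by
  intro n
  induction n using Nat.strong_induction_on with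
  | _ n ih =>
    intro h s ans hlen hne hh hperm
    obtain ⟨nn, rfl⟩ : ∃ nn, n = nn + 1 := by
      have := List.length_pos_of_ne_nil hne
      exact ⟨n - 1, by omega⟩
    have hsne : s ≠ [] := by
      intro hnil; rw [hnil] at hperm; exact hne hperm.eq_nil
    obtain ⟨p1, p2, p3⟩ := heappop_spec h hh hne
    have hpos : 0 < h.length := List.length_pos_of_ne_nil hne
    obtain ⟨m1mem, m1min, m1perm⟩ := minRemove_spec s hsne
    set m := (PySem.List.min? s (fun y => y)).getD 0 with hmdef
    set rest := (PySem.List.remove? s m).getD [] with hrestdef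
    have hv1 : hGet h 0 ≤ m := root_le_mem h hh (hperm.mem_iff.mpr m1mem)
    have hv2 : m ≤ hGet h 0 := by
      have hmem : hGet h 0 ∈ h := by
        rw [hGet_eq _ _ hpos]; exact List.getElem_mem _
      exact m1min _ (hperm.mem_iff.mp hmem)
    have hv : (heappop h).1 = m := by rw [p1]; omega
    have hlen2 : (heappop h).2.length + 1 = h.length := len_heappop h hne
    have hp2rest : (heappop h).2.Perm rest :=
      List.Perm.cons_inv (((hv ▸ p2).trans hperm).trans m1perm.symm)
    simp only [loopA, loopB]
    rw [hv]
    by_cases hK : K ≤ m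
    · rw [if_pos hK, if_pos hK]
    · rw [if_neg hK, if_neg hK]
      have hlr : (heappop h).2.length = rest.length := hp2rest.length_eq
      by_cases hr1 : rest.length < 1
      · rw [if_pos (by omega), if_pos hr1]
      · rw [if_neg (by omega), if_neg hr1]
        have hrne : rest ≠ [] := by
          intro hnil; rw [hnil] at hr1; simp at hr1
        have hne2 : (heappop h).2 ≠ [] := by
          intro hnil; rw [hnil] at hlr; simp at hlr; omega
        have hpos2 : 0 < (heappop h).2.length := by omega
        obtain ⟨q1, q2, q3⟩ := heappop_spec (heappop h).2 p3 hne2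
        obtain ⟨m2mem, m2min, m2perm⟩ := minRemove_spec rest hrne
        set m1 := (PySem.List.min? rest (fun y => y)).getD 0 with hm1def
        set rest2 := (PySem.List.remove? rest m1).getD [] with hrest2def
        have hw1 : hGet (heappop h).2 0 ≤ m1 :=
          root_le_mem _ p3 (hp2rest.mem_iff.mpr m2mem)
        have hw2 : m1 ≤ hGet (heappop h).2 0 := by
          have hmem : hGet (heappop h).2 0 ∈ (heappop h).2 := by
            rw [hGet_eq _ _ hpos2]; exact List.getElem_mem _
          exact m2min _ (hp2rest.mem_iff.mp hmem)
        have hw : (heappop (heappop h).2).1 = m1 := by rw [q1]; omega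
        have hlen3 : (heappop (heappop h).2).2.length + 1 = (heappop h).2.length :=
          len_heappop _ hne2
        obtain ⟨r1, r2⟩ := heappush_spec (heappop (heappop h).2).2 q3
          (m + (heappop (heappop h).2).1 * 2)
        have hq2' : (heappop (heappop h).2).2.Perm rest2 :=
          List.Perm.cons_inv (((hw ▸ q2).trans hp2rest).trans m2perm.symm)
        have hlenp : (heappush (heappop (heappop h).2).2
            (m + (heappop (heappop h).2).1 * 2)).length = nn := by
          rw [len_heappush]; omega
        refine ih nn (by omega) _ _ _ hlenp ?_ r2 ?_
        · intro hnil; rw [hnil] at hlenp; simp at hlenp; omega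
        · rw [hw] at r1 ⊢
          exact (r1.trans (hq2'.cons _)).trans (List.perm_append_singleton _ _).symm

-- ===== VERDICT =====
theorem solution_spec : Claim_equal_solution := by
  intro scoville K _hdom hpre
  unfold Spec_solution solution solution_alt
  obtain ⟨hlen, hperm, hheap⟩ := heapify_spec scoville
  rw [← hlen]
  refine loop_eq K (heapify scoville).length _ _ _ rfl ?_ hheap hperm
  · have := List.length_pos_of_ne_nil hpre
    intro hnil; rw [hnil] at hlen; simp at hlen; omega
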